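-- pv_equiv track=rewrite | github.com/Handonggon/coding_test | programmers/챌린지/코딩테스트 실전 대비 모의고사(2022)/1차(7.13~8.23)/재윤/3번/code.py | solution
-- ===== SOURCE A (Python) =====
-- def solution(order):
--     answer = 0
--     product = [i for i in range(max(order),0,-1)]
--     bozo = []
--     for i in order:
--         while product != [] or bozo != []:
--             if len(product) != 0:
--                 a = product.pop()
--                 if a == i:
--                     del a
--                     answer += 1
--                     break
--                 elif a < i :
--                     bozo.append(a)
--                 else:
--                     if bozo == []:
--                         return answer
--                     product.append(a)
--                     if bozo[-1] == i:
--                         del bozo[-1]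
--                         answer += 1
--                         break
--                     else:
--                         return answer
--             else:
--                 if bozo == []:
--                     return answer
--                 if bozo[-1] == i:
--                         del bozo[-1]
--                         answer += 1
--                         break
--                 else:
--                     return answer
--
--
--     return answer
-- ===== SOURCE B (Python) =====
-- def solution(order):
--     count = 0
--     highest = 0          # largest box number that has left the belt so far
--     runs = []            # stack of (lo, hi): contiguous runs of boxes waiting on the side
--     for i in order:
--         if i > highest:
--             if i > highest + 1:
--                 runs.append((highest + 1, i - 1))
--             highest = i
--             count += 1
--         elif runs and runs[-1][1] == i:
--             lo, hi = runs.pop()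
--             if lo < hi:
--                 runs.append((lo, hi - 1))
--             count += 1
--         else:
--             return count
--     return count
-- ===== Notes on version B (the rewrite author's own statement) =====
-- stated objective: faster
-- what changed: Instead of materialising the 1..max(order) box list and simulating pops/pushes of individual boxes, B keeps only the highest box number taken so far plus a stack of (lo,hi) INTERVALS of boxes waiting aside, so each order item is one O(1) interval operation and no list of size max(order) is ever built.
import Mathlib
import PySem

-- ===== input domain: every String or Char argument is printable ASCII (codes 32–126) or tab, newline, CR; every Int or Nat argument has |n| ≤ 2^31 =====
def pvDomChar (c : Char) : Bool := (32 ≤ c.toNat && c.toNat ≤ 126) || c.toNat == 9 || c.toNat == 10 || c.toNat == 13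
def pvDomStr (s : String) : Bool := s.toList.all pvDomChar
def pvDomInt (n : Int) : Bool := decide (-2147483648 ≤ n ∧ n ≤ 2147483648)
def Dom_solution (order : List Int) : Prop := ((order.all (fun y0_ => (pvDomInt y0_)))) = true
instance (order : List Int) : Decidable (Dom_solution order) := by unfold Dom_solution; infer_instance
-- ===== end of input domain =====

-- B is faster: it never builds the 1..max(order) list and does one O(1) interval
-- operation per order item (highest box taken so far + a stack of (lo,hi) intervals
-- of boxes set aside), where A pops/pushes boxes one at a time.

-- ===== PORT A =====
-- Python stacks are kept top-of-stack FIRST: Python's `product.pop()` /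
-- `product.append(a)` / `bozo[-1]` / `bozo.append(a)` / `del bozo[-1]` become
-- head pattern-match / cons / head / cons / tail on these lists.
-- A's inner `while product != [] or bozo != []` loop; result:
--   Sum.inl ans              = the loop executed `return ans` (exits solution)
--   Sum.inr (prod, boz, ans) = `break` or normal while-exit; the for loop continues
def aWhile (i : Int) : List Int → List Int → Int → Sum Int (List Int × List Int × Int)
  | a :: rest, bozo, answer =>
      if a = i then Sum.inr (rest, bozo, answer + 1)          -- pop; a == i: break
      else if a < i then aWhile i rest (a :: bozo) answer     -- bozo.append(a); loop
      else match bozo with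
        | [] => Sum.inl answer                                -- return answer
        | b :: bt =>                                          -- product.append(a)
          if b = i then Sum.inr (a :: rest, bt, answer + 1)   -- del bozo[-1]; break
          else Sum.inl answer                                 -- return answer
  | [], bozo, answer =>
      match bozo with
      | [] => Sum.inr ([], [], answer)                        -- while condition false
      | b :: bt =>
          if b = i then Sum.inr ([], bt, answer + 1)          -- del bozo[-1]; break
          else Sum.inl answer                                 -- return answer

-- A's `for i in order` loop
def aFor : List Int → List Int → List Int → Int → Int
  | [], _, _, answer => answer
  | i :: rest, product, bozo, answer =>
      match aWhile i product bozo answer with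
      | Sum.inl ans => ans
      | Sum.inr (p, b, ans) => aFor rest p b ans

-- `product = [i for i in range(max(order),0,-1)]`; `.reverse` only converts the
-- Python list to the top-of-stack-first representation used above.
def solution (order : List Int) : Int :=
  match PySem.List.max? order (fun x => x) with
  | none => 0          -- max([]) raises ValueError: excluded by Pre_solution
  | some m => aFor order ((PySem.List.pyRange m 0 (-1)).reverse) [] 0

-- ===== PORT B =====
-- B's `for i in order` loop: `highest` = largest box taken so far, `runs` =
-- Python's list of (lo, hi) interval pairs, top of the stack FIRST.
def bFor : List Int → Int → List (Int × Int) → Int → Int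
  | [], _, _, count => count
  | i :: rest, highest, runs, count =>
      if highest < i then
        bFor rest i (if highest + 1 < i then (highest + 1, i - 1) :: runs else runs) (count + 1)
      else match runs with
        | (lo, hi) :: rt =>
            if hi = i then
              bFor rest highest (if lo < hi then (lo, hi - 1) :: rt else rt) (count + 1)
            else count
        | [] => count

def solution_alt (order : List Int) : Int := bFor order 0 [] 0

-- ===== PRECONDITION & SPEC =====
-- Pre_ excludes only [] : there `max(order)` raises ValueError in A.
def Pre_solution (order : List Int) : Prop := order ≠ []
instance (order : List Int) : Decidable (Pre_solution order) := by unfold Pre_solution; infer_instance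
def pvWitness_solution : List Int := [2, 1, 3]

def Spec_solution (order : List Int) (out : Int) : Prop := out = solution_alt order
instance (order : List Int) (out : Int) : Decidable (Spec_solution order out) := by unfold Spec_solution; infer_instance

-- ===== CLAIM (what is proved, stated in full; the proofs are below) =====
def Claim_equal_solution : Prop := ∀ (order : List Int), Dom_solution order → Pre_solution order → Spec_solution order (solution order)

-- ===== LEMMAS AND PROOFS =====

-- the ascending run of boxes lo, lo+1, …, hi
def rangeAsc (lo hi : Int) : List Int := (List.range (hi + 1 - lo).toNat).map (fun (k : Nat) => lo + (k : Int))

-- A's side stack (top first) described by B's interval stack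
def expand : List (Int × Int) → List Int
  | [] => []
  | (lo, hi) :: rt => (rangeAsc lo hi).reverse ++ expand rt

theorem rangeAsc_nil {lo hi : Int} (h : hi < lo) : rangeAsc lo hi = [] := by
  unfold rangeAsc
  have : (hi + 1 - lo).toNat = 0 := by omega
  simp [this]

theorem rangeAsc_cons {lo hi : Int} (h : lo ≤ hi) : rangeAsc lo hi = lo :: rangeAsc (lo + 1) hi := by
  unfold rangeAsc
  have h1 : (hi + 1 - lo).toNat = (hi + 1 - (lo + 1)).toNat + 1 := by omega
  rw [h1, List.range_succ_eq_map, List.map_cons, List.map_map]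
  refine congrArg₂ _ (by simp) (List.map_congr_left fun k _ => ?_)
  simp [Function.comp]
  ring

theorem rangeAsc_snoc : ∀ (k : Nat) (lo hi : Int), (hi - lo).toNat = k → lo ≤ hi →
    rangeAsc lo hi = rangeAsc lo (hi - 1) ++ [hi] := by
  intro k
  induction k with
  | zero =>
      intro lo hi hk h
      have : lo = hi := by omega
      subst this
      rw [rangeAsc_cons (le_refl lo), rangeAsc_nil (by omega), rangeAsc_nil (by omega)]
      rfl
  | succ k ih =>
      intro lo hi hk h
      have hlt : lo < hi := by omega
      rw [rangeAsc_cons h, ih (lo + 1) hi (by omega) (by omega),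
          rangeAsc_cons (show lo ≤ hi - 1 by omega)]
      rfl

theorem expand_cons {lo hi : Int} (h : lo ≤ hi) (rt : List (Int × Int)) :
    expand ((lo, hi) :: rt) = hi :: ((rangeAsc lo (hi - 1)).reverse ++ expand rt) := by
  show (rangeAsc lo hi).reverse ++ expand rt = _
  rw [rangeAsc_snoc (hi - lo).toNat lo hi rfl h]
  simp

theorem pyRange_rev (m : Int) : (PySem.List.pyRange m 0 (-1)).reverse = rangeAsc 1 m := by
  by_cases h : m ≤ 0
  · rw [PySem.List.pyRange_neg_one_eq_nil h, rangeAsc_nil (by omega)]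
    simp
  · rw [PySem.List.pyRange_neg_one_eq_reverse, List.reverse_reverse]
    unfold rangeAsc PySem.List.pyRange
    simp [show (0:Int) < m by omega]

-- A's inner loop when box i is still on the belt: pops belt..i-1 onto bozo, packs i
theorem aWhile_hit : ∀ (k : Nat) (belt i n : Int) (bozo : List Int) (ans : Int),
    (i - belt).toNat = k → belt ≤ i → i ≤ n →
    aWhile i (rangeAsc belt n) bozo ans =
      Sum.inr (rangeAsc (i + 1) n, (rangeAsc belt (i - 1)).reverse ++ bozo, ans + 1) := by
  intro k
  induction k with
  | zero =>
      intro belt i n bozo ans hk h1 h2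
      have hbi : belt = i := by omega
      subst hbi
      rw [rangeAsc_cons h2, rangeAsc_nil (show belt - 1 < belt by omega)]
      simp [aWhile]
  | succ k ih =>
      intro belt i n bozo ans hk h1 h2
      have hlt : belt < i := by omega
      rw [rangeAsc_cons (by omega)]
      simp only [aWhile, if_neg (by omega : ¬ belt = i), if_pos hlt]
      rw [ih (belt + 1) i n (belt :: bozo) ans (by omega) (by omega) h2,
          rangeAsc_cons (show belt ≤ i - 1 by omega)]
      simp

-- one step of A's inner loop, expressed on B's state
theorem step_eq (i M n : Int) (runs : List (Int × Int)) (ans : Int)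
    (hn : i ≤ n) (hr : ∀ p ∈ runs, p.1 ≤ p.2) :
    aWhile i (rangeAsc (M + 1) n) (expand runs) ans =
      (if M < i then
        Sum.inr (rangeAsc (i + 1) n,
                 expand (if M + 1 < i then (M + 1, i - 1) :: runs else runs), ans + 1)
      else match runs with
        | (lo, hi) :: rt =>
            if hi = i then
              Sum.inr (rangeAsc (M + 1) n,
                       expand (if lo < hi then (lo, hi - 1) :: rt else rt), ans + 1)
            else Sum.inl ans
        | [] => if M < n then Sum.inl ans else Sum.inr ([], [], ans)) := by
  by_cases hMi : M < i
  · rw [if_pos hMi, aWhile_hit (i - (M + 1)).toNat (M + 1) i n (expand runs) ans rfl (by omega) hn]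
    by_cases hM1 : M + 1 < i
    · rw [if_pos hM1]
      rfl
    · rw [if_neg hM1, rangeAsc_nil (show i - 1 < M + 1 by omega)]
      simp
  · rw [if_neg hMi]
    have hiM : i ≤ M := by omega
    -- the bozo head, when runs is nonempty
    by_cases hle : M + 1 ≤ n
    · -- product nonempty: a = M+1 > i, pushed back; inspect bozo
      rw [rangeAsc_cons hle]
      simp only [aWhile, if_neg (by omega : ¬ M + 1 = i), if_neg (by omega : ¬ M + 1 < i)]
      cases runs with
      | nil => simp [expand, show M < n by omega]
      | cons p rt =>
          obtain ⟨lo, hi⟩ := p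
          have hlh : lo ≤ hi := hr (lo, hi) (by simp)
          rw [expand_cons hlh]
          by_cases hhi : hi = i
          · simp only [if_pos hhi]
            rw [← rangeAsc_cons hle]
            by_cases hlo : lo < hi
            · rw [if_pos hlo]
              subst hhi; rfl
            · rw [if_neg hlo, rangeAsc_nil (show hi - 1 < lo by omega)]
              subst hhi; simp
          · simp [hhi]
    · -- product empty: M ≥ n
      rw [rangeAsc_nil (show n < M + 1 by omega)]
      cases runs with
      | nil => simp [aWhile, expand, show ¬ M < n by omega]
      | cons p rt =>
          obtain ⟨lo, hi⟩ := p
          have hlh : lo ≤ hi := hr (lo, hi) (by simp)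
          rw [expand_cons hlh]
          by_cases hhi : hi = i
          · simp only [aWhile, if_pos hhi]
            by_cases hlo : lo < hi
            · rw [if_pos hlo]
              subst hhi; rfl
            · rw [if_neg hlo, rangeAsc_nil (show hi - 1 < lo by omega)]
              subst hhi; simp
          · simp [aWhile, hhi]

theorem aFor_nil : ∀ (rest : List Int) (answer : Int), aFor rest [] [] answer = answer := by
  intro rest
  induction rest with
  | nil => intro answer; rfl
  | cons i t ih => intro answer; simp [aFor, aWhile, ih]

theorem main_eq : ∀ (order : List Int) (n M : Int) (runs : List (Int × Int)) (ans : Int),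
    (∀ j ∈ order, j ≤ n) → (∀ p ∈ runs, p.1 ≤ p.2) →
    aFor order (rangeAsc (M + 1) n) (expand runs) ans = bFor order M runs ans := by
  intro order
  induction order with
  | nil => intro n M runs ans _ _; rfl
  | cons i rest ih =>
      intro n M runs ans hn hr
      have hni : i ≤ n := hn i (by simp)
      have hnr : ∀ j ∈ rest, j ≤ n := fun j hj => hn j (by simp [hj])
      simp only [aFor, bFor, step_eq i M n runs ans hni hr]
      by_cases hMi : M < i
      · simp only [if_pos hMi]
        by_cases h1 : M + 1 < i
        · simp only [if_pos h1]
          exact ih n i ((M + 1, i - 1) :: runs) (ans + 1) hnr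
            (by intro p hp
                rcases List.mem_cons.mp hp with h | h
                · subst h; dsimp only; omega
                · exact hr p h)
        · simp only [if_neg h1]
          exact ih n i runs (ans + 1) hnr hr
      · simp only [if_neg hMi]
        cases runs with
        | nil =>
            by_cases h2 : M < n
            · simp [h2]
            · simp only [if_neg h2]
              exact aFor_nil rest ans
        | cons p rt =>
            obtain ⟨lo, hi⟩ := p
            by_cases hhi : hi = i
            · simp only [if_pos hhi]
              by_cases hlo : lo < hi
              · simp only [if_pos hlo]
                exact ih n M ((lo, hi - 1) :: rt) (ans + 1) hnr
                  (by intro q hq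
                      rcases List.mem_cons.mp hq with h | h
                      · subst h; dsimp only; omega
                      · exact hr q (List.mem_cons_of_mem _ h))
              · simp only [if_neg hlo]
                exact ih n M rt (ans + 1) hnr (fun q hq => hr q (List.mem_cons_of_mem _ hq))
            · simp [hhi]

-- ===== VERDICT (by name: the statement is the Claim_ definition above) =====
theorem solution_spec : Claim_equal_solution := by
  intro order _ hpre
  unfold Spec_solution solution solution_alt
  cases h : PySem.List.max? order (fun x => x) with
  | none => exact absurd ((PySem.List.max?_eq_none_iff order (fun x => x)).mp h) hpre
  | some m =>
      have hmax : ∀ j ∈ order, j ≤ m := fun j hj => PySem.List.max?_isMax h j hj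
      show aFor order ((PySem.List.pyRange m 0 (-1)).reverse) [] 0 = bFor order 0 [] 0
      have h0 : (PySem.List.pyRange m 0 (-1)).reverse = rangeAsc (0 + 1) m := by
        rw [pyRange_rev]; norm_num
      rw [h0, show ([] : List Int) = expand [] from rfl, main_eq order m 0 [] 0 hmax (by simp)]
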